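-- pv_equiv track=rewrite | github.com/khuushichand/aiml-project | tldw_Server_API/app/core/TTS/audio_converter.py | _build_ffmetadata
-- ===== SOURCE A (Python) =====
-- from typing import Any, Optional
--
-- def _build_ffmetadata(
--     chapter_titles: list[str],
--     chapter_durations_ms: list[int],
--     metadata: Optional[dict[str, str]] = None,
-- ) -> str:
--     lines = [";FFMETADATA1"]
--     if metadata:
--         title = metadata.get("title")
--         artist = metadata.get("artist")
--         if title:
--             lines.append(f"title={title}")
--         if artist:
--             lines.append(f"artist={artist}")
--
--     current_ms = 0
--     for idx, duration_ms in enumerate(chapter_durations_ms):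
--         duration_ms = max(1, int(duration_ms))
--         start = current_ms
--         end = current_ms + duration_ms
--         current_ms = end
--         chapter_title = chapter_titles[idx] if idx < len(chapter_titles) else f"Chapter {idx + 1}"
--         lines.extend(
--             [
--                 "[CHAPTER]",
--                 "TIMEBASE=1/1000",
--                 f"START={start}",
--                 f"END={end}",
--                 f"title={chapter_title}",
--             ]
--         )
--
--     return "\n".join(lines) + "\n"
-- ===== SOURCE B (Python) =====
-- from typing import Optional
--
--
-- def _build_ffmetadata(
--     chapter_titles: list[str],
--     chapter_durations_ms: list[int],
--     metadata: Optional[dict[str, str]] = None,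
-- ) -> str:
--     header = ";FFMETADATA1\n"
--     if metadata:
--         title = metadata.get("title")
--         artist = metadata.get("artist")
--         if title:
--             header += f"title={title}\n"
--         if artist:
--             header += f"artist={artist}\n"
--
--     # Walk the chapters BACKWARDS: start from the total running time and recover each
--     # chapter's start by subtracting its clamped duration from the current end.
--     clamped = [max(1, int(d)) for d in chapter_durations_ms]
--     chunks = []
--     end = sum(clamped)
--     for i in range(len(clamped) - 1, -1, -1):
--         start = end - clamped[i]
--         name = chapter_titles[i] if i < len(chapter_titles) else f"Chapter {i + 1}"
--         chunks.append(f"[CHAPTER]\nTIMEBASE=1/1000\nSTART={start}\nEND={end}\ntitle={name}\n")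
--         end = start
--     return header + "".join(reversed(chunks))
-- ===== Notes on version B (the rewrite author's own statement) =====
-- stated objective: alternative
-- what changed: A walks the chapters forward with a running clock, appending lines to one flat list that is newline-joined at the end; B computes the total clamped duration once, then traverses the chapters in REVERSE order, recovering each chapter's start by subtracting its clamped duration from the current end, collecting ready-made blocks and reversing them at the end.
import Mathlib
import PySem

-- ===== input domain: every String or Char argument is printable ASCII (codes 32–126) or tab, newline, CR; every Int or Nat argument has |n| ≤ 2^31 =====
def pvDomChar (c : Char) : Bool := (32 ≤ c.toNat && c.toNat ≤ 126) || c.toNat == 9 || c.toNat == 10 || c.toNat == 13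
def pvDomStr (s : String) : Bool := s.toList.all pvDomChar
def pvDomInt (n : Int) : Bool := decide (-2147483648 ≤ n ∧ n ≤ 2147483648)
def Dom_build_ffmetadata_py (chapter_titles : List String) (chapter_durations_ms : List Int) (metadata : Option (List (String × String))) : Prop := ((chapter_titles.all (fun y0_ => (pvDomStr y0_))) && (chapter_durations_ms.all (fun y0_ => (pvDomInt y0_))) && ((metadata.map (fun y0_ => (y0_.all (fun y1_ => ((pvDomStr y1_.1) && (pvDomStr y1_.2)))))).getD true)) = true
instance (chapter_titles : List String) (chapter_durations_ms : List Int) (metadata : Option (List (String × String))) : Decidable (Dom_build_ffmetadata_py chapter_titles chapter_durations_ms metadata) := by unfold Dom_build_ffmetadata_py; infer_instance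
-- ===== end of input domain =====

-- B replaces A's forward pass with a running clock by a reverse traversal: it sums the clamped
-- durations once, walks the chapters from last to first recovering each start by subtraction,
-- and reverses the collected blocks (objective: alternative decomposition, same cost).

-- ===== PORT A =====
-- literal transliteration of _build_ffmetadata: flat `lines` list built in one forward loop
-- carrying current_ms, then "\n".join(lines) + "\n".
def build_ffmetadata_py (chapter_titles : List String) (chapter_durations_ms : List Int) (metadata : Option (List (String × String))) : String :=
  let lines : List String := [";FFMETADATA1"]
  let lines :=
    match metadata with
    | some md =>
      if md ≠ [] then
        let title := (PySem.Dict.mk md).get? "title"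
        let artist := (PySem.Dict.mk md).get? "artist"
        let lines :=
          match title with
          | some t => if t ≠ "" then lines ++ ["title=" ++ t] else lines
          | none => lines
        match artist with
        | some a => if a ≠ "" then lines ++ ["artist=" ++ a] else lines
        | none => lines
      else lines
    | none => lines
  let res := (PySem.List.enumerate chapter_durations_ms 0).foldl
    (fun (st : List String × Int) p =>
      let dm := max 1 p.2
      let e := st.2 + dm
      let ct := if p.1 < (chapter_titles.length : Int) then PySem.List.pyGetD chapter_titles p.1 "" else "Chapter " ++ PySem.Int.toStr (p.1 + 1)
      (st.1 ++ ["[CHAPTER]", "TIMEBASE=1/1000", "START=" ++ PySem.Int.toStr st.2, "END=" ++ PySem.Int.toStr e, "title=" ++ ct], e))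
    (lines, 0)
  PySem.Str.join "\n" res.1 ++ "\n"

-- ===== PORT B =====
-- Source B's backward loop `for i in range(len(clamped)-1, -1, -1)`: structural recursion over the
-- reversed clamped list, carrying the index i (descending) and the current end time.
def bRev (titles : List String) : List Int → Int → Int → List String
  | [], _, _ => []
  | d :: r, i, e =>
    let s := e - d
    let name := if i < (titles.length : Int) then PySem.List.pyGetD titles i "" else "Chapter " ++ PySem.Int.toStr (i + 1)
    ("[CHAPTER]\nTIMEBASE=1/1000\nSTART=" ++ PySem.Int.toStr s ++ "\nEND=" ++ PySem.Int.toStr e ++ "\ntitle=" ++ name ++ "\n")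
      :: bRev titles r (i - 1) s

-- literal transliteration of Source B: header string, total, backward chunk collection, final reverse+join.
def build_ffmetadata_py_alt (chapter_titles : List String) (chapter_durations_ms : List Int) (metadata : Option (List (String × String))) : String :=
  let header := ";FFMETADATA1\n"
  let header :=
    match metadata with
    | some md =>
      if md ≠ [] then
        let title := (PySem.Dict.mk md).get? "title"
        let artist := (PySem.Dict.mk md).get? "artist"
        let header :=
          match title with
          | some t => if t ≠ "" then header ++ "title=" ++ t ++ "\n" else header
          | none => header
        match artist with
        | some a => if a ≠ "" then header ++ "artist=" ++ a ++ "\n" else header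
        | none => header
      else header
    | none => header
  let clamped := chapter_durations_ms.map (fun d => max 1 d)
  let chunks := bRev chapter_titles clamped.reverse ((clamped.length : Int) - 1) clamped.sum
  header ++ PySem.Str.join "" chunks.reverse

-- ===== PRECONDITION & SPEC =====
def Spec_build_ffmetadata_py (chapter_titles : List String) (chapter_durations_ms : List Int) (metadata : Option (List (String × String))) (out : String) : Prop := out = build_ffmetadata_py_alt chapter_titles chapter_durations_ms metadata
instance (chapter_titles : List String) (chapter_durations_ms : List Int) (metadata : Option (List (String × String))) (out : String) : Decidable (Spec_build_ffmetadata_py chapter_titles chapter_durations_ms metadata out) := by unfold Spec_build_ffmetadata_py; infer_instance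

-- ===== CLAIM (what is proved, stated in full; the proofs are below) =====
def Claim_equal_build_ffmetadata_py : Prop := ∀ (chapter_titles : List String) (chapter_durations_ms : List Int) (metadata : Option (List (String × String))), Dom_build_ffmetadata_py chapter_titles chapter_durations_ms metadata → Spec_build_ffmetadata_py chapter_titles chapter_durations_ms metadata (build_ffmetadata_py chapter_titles chapter_durations_ms metadata)

-- ===== LEMMAS AND PROOFS =====

-- the chapter-name expression both programs use at index i
def nameOf (titles : List String) (i : Int) : String :=
  if i < (titles.length : Int) then PySem.List.pyGetD titles i "" else "Chapter " ++ PySem.Int.toStr (i + 1)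

-- one [CHAPTER] block as B emits it
def chunkStr (s e : Int) (n : String) : String :=
  "[CHAPTER]\nTIMEBASE=1/1000\nSTART=" ++ PySem.Int.toStr s ++ "\nEND=" ++ PySem.Int.toStr e ++ "\ntitle=" ++ n ++ "\n"

-- forward list of blocks over an already-clamped duration list, from index i and clock cur
def fwdC (titles : List String) : List Int → Int → Int → List String
  | [], _, _ => []
  | d :: r, i, cur => chunkStr cur (cur + d) (nameOf titles i) :: fwdC titles r (i + 1) (cur + d)

-- the flat list of [CHAPTER] lines A's loop appends, from index i and clock cur
def chunkLines (titles : List String) : List Int → Int → Int → List String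
  | [], _, _ => []
  | d :: r, i, cur =>
    ["[CHAPTER]", "TIMEBASE=1/1000", "START=" ++ PySem.Int.toStr cur, "END=" ++ PySem.Int.toStr (cur + max 1 d), "title=" ++ nameOf titles i]
      ++ chunkLines titles r (i + 1) (cur + max 1 d)

-- the characters of the corresponding output region (each line newline-terminated)
def chunkChars (titles : List String) : List Int → Int → Int → List Char
  | [], _, _ => []
  | d :: r, i, cur =>
    "[CHAPTER]\nTIMEBASE=1/1000\nSTART=".toList ++ PySem.Int.toChars cur
      ++ "\nEND=".toList ++ PySem.Int.toChars (cur + max 1 d)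
      ++ "\ntitle=".toList ++ (nameOf titles i).toList ++ ['\n']
      ++ chunkChars titles r (i + 1) (cur + max 1 d)

theorem fwdC_append (titles : List String) (a : List Int) : ∀ (b : List Int) (i cur : Int),
    fwdC titles (a ++ b) i cur = fwdC titles a i cur ++ fwdC titles b (i + a.length) (cur + a.sum) := by
  induction a with
  | nil => intro b i cur; simp [fwdC]
  | cons d r ih =>
    intro b i cur
    simp only [List.cons_append, fwdC, ih, List.length_cons, List.sum_cons]
    congr 2
    push_cast
    ring_nf

theorem bRev_eq (titles : List String) (rc : List Int) : ∀ (i e : Int),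
    bRev titles rc i e = (fwdC titles rc.reverse (i - rc.length + 1) (e - rc.sum)).reverse := by
  induction rc with
  | nil => intro i e; simp [bRev, fwdC]
  | cons d r ih =>
    intro i e
    simp only [bRev, List.reverse_cons, List.sum_cons]
    rw [fwdC_append, ih (i - 1) (e - d)]
    simp only [List.reverse_append, List.length_reverse, List.sum_reverse, fwdC, List.reverse_cons,
      List.reverse_nil, List.nil_append, List.length_cons]
    have h1 : i - ((r.length + 1 : Nat) : Int) + 1 = i - (r.length : Int) := by push_cast; ring
    rw [h1]
    have h2 : i - (r.length : Int) + (r.length : Int) = i := by ring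
    rw [h2]
    have h3 : e - (d + r.sum) + r.sum = e - d := by ring
    rw [h3]
    have h4 : e - d + d = e := by ring
    rw [h4]
    have h5 : e - (d + r.sum) = e - d - r.sum := by ring
    have h6 : i - (r.length : Int) = i - 1 - (r.length : Int) + 1 := by ring
    rw [h5, h6]
    simp [chunkStr, nameOf]

-- the blocks over the clamped list, rendered to characters, are exactly A's chapter region
theorem fwdC_chunkChars (titles : List String) (durs : List Int) : ∀ (i cur : Int),
    ((fwdC titles (durs.map (fun d => max 1 d)) i cur).map String.toList).flatten
      = chunkChars titles durs i cur := by
  induction durs with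
  | nil => intro i cur; simp [fwdC, chunkChars]
  | cons d r ih =>
    intro i cur
    simp only [List.map_cons, fwdC, chunkChars, List.flatten_cons]
    rw [ih]
    simp [chunkStr, String.toList_append, PySem.Int.toList_toStr]

-- "".join is character-flattening
theorem joinEmpty : ∀ (ls : List (List Char)), PySem.Chars.join [] ls = ls.flatten := by
  intro ls
  induction ls with
  | nil => simp [PySem.Chars.join_nil]
  | cons a t ih =>
    cases t with
    | nil => simp [PySem.Chars.join_singleton]
    | cons b t' => rw [PySem.Chars.join_cons_cons, ih]; simp

theorem a_fold (titles : List String) (durs : List Int) : ∀ (i : Int) (cur : Int) (lines : List String),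
    ((PySem.List.enumerate durs i).foldl
      (fun (st : List String × Int) p =>
        let dm := max 1 p.2
        let e := st.2 + dm
        let ct := if p.1 < (titles.length : Int) then PySem.List.pyGetD titles p.1 "" else "Chapter " ++ PySem.Int.toStr (p.1 + 1)
        (st.1 ++ ["[CHAPTER]", "TIMEBASE=1/1000", "START=" ++ PySem.Int.toStr st.2, "END=" ++ PySem.Int.toStr e, "title=" ++ ct], e))
      (lines, cur)).1
    = lines ++ chunkLines titles durs i cur := by
  induction durs with
  | nil => intro i cur lines; simp [PySem.List.enumerate_nil, chunkLines]
  | cons d r ih =>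
    intro i cur lines
    rw [PySem.List.enumerate_cons]
    simp only [List.foldl_cons]
    rw [ih]
    simp [chunkLines, nameOf]

theorem joinNl : ∀ (ls : List (List Char)), ls ≠ [] →
    PySem.Chars.join ['\n'] ls ++ ['\n'] = (ls.map (fun l => l ++ ['\n'])).flatten := by
  intro ls
  induction ls with
  | nil => intro h; cases h rfl
  | cons a t ih =>
    intro _
    cases t with
    | nil => simp [PySem.Chars.join_singleton]
    | cons b t' =>
      rw [PySem.Chars.join_cons_cons]
      have hrec := ih (by simp)
      rw [List.append_assoc, List.append_assoc, hrec]
      simp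

theorem chunk_chars_eq (titles : List String) (durs : List Int) : ∀ (i cur : Int),
    ((chunkLines titles durs i cur).map (fun l => l.toList ++ ['\n'])).flatten
      = chunkChars titles durs i cur := by
  induction durs with
  | nil => intro i cur; simp [chunkLines, chunkChars]
  | cons d r ih =>
    intro i cur
    simp only [chunkLines, chunkChars, List.map_append, List.map_cons, List.map_nil,
      List.flatten_append, List.flatten_cons, List.flatten_nil]
    rw [ih]
    simp [String.toList_append, PySem.Int.toList_toStr]

-- the two programs agree given matching headers
theorem core (titles : List String) (durs : List Int) (lines0 : List String) (out0 : String)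
    (hne : lines0 ≠ [])
    (h : out0.toList = (lines0.map (fun l => l.toList ++ ['\n'])).flatten) :
    PySem.Str.join "\n"
      (((PySem.List.enumerate durs 0).foldl
        (fun (st : List String × Int) p =>
          let dm := max 1 p.2
          let e := st.2 + dm
          let ct := if p.1 < (titles.length : Int) then PySem.List.pyGetD titles p.1 "" else "Chapter " ++ PySem.Int.toStr (p.1 + 1)
          (st.1 ++ ["[CHAPTER]", "TIMEBASE=1/1000", "START=" ++ PySem.Int.toStr st.2, "END=" ++ PySem.Int.toStr e, "title=" ++ ct], e))
        (lines0, 0)).1) ++ "\n"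
    = out0 ++ PySem.Str.join ""
        (bRev titles (durs.map (fun d => max 1 d)).reverse 
          (((durs.map (fun d => max 1 d)).length : Int) - 1) (durs.map (fun d => max 1 d)).sum).reverse := by
  apply String.toList_inj.mp
  rw [bRev_eq]
  have hidx : (((durs.map (fun d => max 1 d)).length : Int) - 1)
      - ((durs.map (fun d => max 1 d)).reverse.length : Int) + 1 = 0 := by
    simp
  have hsum : (durs.map (fun d => max 1 d)).sum - (durs.map (fun d => max 1 d)).reverse.sum = 0 := by
    rw [List.sum_reverse]; ring
  rw [hidx, hsum, List.reverse_reverse, List.reverse_reverse]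
  rw [a_fold, String.toList_append, String.toList_append, PySem.Str.toList_join, PySem.Str.toList_join]
  rw [show ("\n" : String).toList = ['\n'] from rfl, show ("" : String).toList = [] from rfl]
  rw [joinEmpty, joinNl _ (by cases lines0 with | nil => exact absurd rfl hne | cons a t => simp), h]
  simp only [List.map_append, List.flatten_append, List.map_map, Function.comp_def]
  rw [chunk_chars_eq, fwdC_chunkChars]

theorem header_step (lines : List String) (out : String) (o : Option String) (lab : String)
    (h : out.toList = (lines.map (fun l : String => l.toList ++ ['\n'])).flatten) :
    (match o with
     | some t => if t ≠ "" then out ++ lab ++ t ++ "\n" else out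
     | none => out).toList
    = ((match o with
        | some t => if t ≠ "" then lines ++ [lab ++ t] else lines
        | none => lines).map (fun l : String => l.toList ++ ['\n'])).flatten := by
  cases o with
  | none => exact h
  | some t =>
    by_cases ht : t = "" <;>
      simp [ht, h, String.toList_append, show ("\n" : String).toList = ['\n'] from rfl]

theorem header_ne (lines : List String) (o : Option String) (lab : String) (h : lines ≠ []) :
    (match o with
     | some t => if t ≠ "" then lines ++ [lab ++ t] else lines
     | none => lines) ≠ [] := by
  cases o with
  | none => exact h
  | some t => by_cases ht : t = "" <;> simp [ht, h]

-- ===== VERDICT (by name: the statement is the Claim_ definition above) =====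
theorem build_ffmetadata_py_spec : Claim_equal_build_ffmetadata_py := by
  intro titles durs md _
  unfold Spec_build_ffmetadata_py build_ffmetadata_py build_ffmetadata_py_alt
  cases md with
  | none =>
    dsimp only
    exact core titles durs [";FFMETADATA1"] ";FFMETADATA1\n" (by simp) (by rfl)
  | some l =>
    dsimp only
    by_cases hl : l = []
    · simp only [hl, ne_eq, not_true_eq_false, if_false]
      exact core titles durs [";FFMETADATA1"] ";FFMETADATA1\n" (by simp) (by rfl)
    · simp only [ne_eq, hl, not_false_iff, if_true]
      refine core titles durs _ _ ?_ ?_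
      · exact header_ne _ _ _ (header_ne _ _ _ (by simp))
      · exact header_step _ _ _ "artist=" (header_step _ _ _ "title=" (by rfl))
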